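-- pv_equiv track=rewrite | github.com/Mouaadgames/ANPI-project-councour-application- | projet de fin de formation.py | findin
-- ===== SOURCE A (Python) =====
-- def findin(element):
--     elm = element[::-1]
--     t = ""
--     for let in elm:
--         if let == ";" or let == " " or let == "-":
--             break
--         t += let
--     t = t[::-1]
--     t = t[:-1]
--     return t
-- ===== SOURCE B (Python) =====
-- def findin(element):
--     tail = ""
--     for c in element:
--         if c in ";- ":
--             tail = ""
--         else:
--             tail += c
--     return tail[:-1]
-- ===== Notes on version B (the rewrite author's own statement) =====
-- stated objective: simpler
-- what changed: Replaces A's reverse-the-string-then-scan-until-delimiter-then-reverse-back loop with a single forward pass that resets the accumulated token at each delimiter, then drops the last character.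
import Mathlib
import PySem

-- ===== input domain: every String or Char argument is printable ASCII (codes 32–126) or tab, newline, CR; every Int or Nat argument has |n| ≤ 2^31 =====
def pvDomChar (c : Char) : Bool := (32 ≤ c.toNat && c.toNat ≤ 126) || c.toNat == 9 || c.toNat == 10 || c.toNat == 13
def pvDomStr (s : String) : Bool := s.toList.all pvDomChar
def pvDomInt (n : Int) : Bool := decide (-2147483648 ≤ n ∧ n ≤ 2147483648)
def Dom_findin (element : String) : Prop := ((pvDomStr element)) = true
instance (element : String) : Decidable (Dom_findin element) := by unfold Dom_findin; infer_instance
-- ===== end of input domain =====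

-- B replaces A's reverse-then-scan-until-delimiter loop with a single forward pass that
-- resets the accumulated token at each delimiter (objective: simpler one-pass structure).

-- ===== PORT A =====
-- the 'for let in elm: if …: break; t += let' loop of A
def findinLoop (t : List Char) : List Char → List Char
  | [] => t
  | c :: rest => if c = ';' ∨ c = ' ' ∨ c = '-' then t else findinLoop (t ++ [c]) rest

def findin (element : String) : String :=
  let elm := (PySem.Chars.slice? element.toList none none (-1)).getD []  -- element[::-1] (step ≠ 0, never none)
  let t := findinLoop [] elm
  let t := (PySem.Chars.slice? t none none (-1)).getD []                 -- t[::-1]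
  let t := PySem.Chars.slice t none (some (-1))                          -- t[:-1]
  String.ofList t

-- ===== PORT B =====
def findin_alt (element : String) : String :=
  let tail := element.toList.foldl
    (fun tail c => if c = ';' ∨ c = '-' ∨ c = ' ' then [] else tail ++ [c]) []
  String.ofList (PySem.Chars.slice tail none (some (-1)))                    -- tail[:-1]

-- ===== PRECONDITION & SPEC =====
def Spec_findin (element : String) (out : String) : Prop := out = findin_alt element
instance (element : String) (out : String) : Decidable (Spec_findin element out) := by unfold Spec_findin; infer_instance

-- ===== CLAIM (what is proved, stated in full; the proofs are below) =====
def Claim_equal_findin : Prop := ∀ (element : String), Dom_findin element → Spec_findin element (findin element)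

-- ===== LEMMAS AND PROOFS =====

-- A's loop collects the maximal delimiter-free prefix of its input after the accumulator
theorem findinLoop_eq (l t : List Char) :
    findinLoop t l = t ++ l.takeWhile (fun c => !(c = ';' ∨ c = ' ' ∨ c = '-' : Bool)) := by
  induction l generalizing t with
  | nil => simp [findinLoop]
  | cons c rest ih =>
    by_cases h : c = ';' ∨ c = ' ' ∨ c = '-'
    · simp [findinLoop, h, List.takeWhile_cons]; tauto
    · have h2 : ¬c = ';' ∧ ¬c = ' ' ∧ ¬c = '-' := by tauto
      simp [findinLoop, h2, ih]

-- B's loop holds the delimiter-free suffix seen so far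
theorem findin_altLoop_eq (l : List Char) :
    l.foldl (fun tail c => if c = ';' ∨ c = '-' ∨ c = ' ' then [] else tail ++ [c]) [] =
      (l.reverse.takeWhile (fun c => !(c = ';' ∨ c = ' ' ∨ c = '-' : Bool))).reverse := by
  induction l using List.reverseRecOn with
  | nil => simp
  | append_singleton l x ih =>
    by_cases h : x = ';' ∨ x = ' ' ∨ x = '-'
    · have h' : x = ';' ∨ x = '-' ∨ x = ' ' := by tauto
      simp [List.foldl_append, h', List.takeWhile_cons]; tauto
    · have h' : ¬ (x = ';' ∨ x = '-' ∨ x = ' ') := by tauto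
      have h2 : ¬x = ';' ∧ ¬x = ' ' ∧ ¬x = '-' := by tauto
      simp [List.foldl_append, h2, ih]

-- ===== VERDICT (by name: the statement is the Claim_ definition above) =====
theorem findin_spec : Claim_equal_findin := by
  intro element _
  unfold Spec_findin findin findin_alt
  simp only [PySem.List.slice?_none_none_neg_one, PySem.Chars.slice?_eq_listSlice?,
    Option.getD_some, findinLoop_eq, findin_altLoop_eq, List.nil_append]
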